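-- pv_equiv track=rewrite | github.com/deut-erium/WriteUps | _drafts/2021/cyberapocalypse21/crypto/tetris/solve.py | transpose_rev
-- ===== SOURCE A (Python) =====
-- def transpose_rev(x,l):
--     lst = []
--     xx = list(range(len(x)))
--     for i in range(l):
--         lst.extend(xx[i::l])
--     retlst = [None for _ in range(len(x))]
--     for i,v in enumerate(lst):
--         retlst[v]=x[i]
--     return "".join(retlst)
-- ===== SOURCE B (Python) =====
-- def transpose_rev(x, l):
--     n = len(x)
--     if n == 0:
--         return ""
--     # offset of each column in x (columns have ragged lengths ceil((n-c)/l))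
--     off = []
--     total = 0
--     for c in range(l):
--         off.append(total)
--         total += (n - c + l - 1) // l
--     # character v of the plaintext sits at position off[v % l] + v // l of x
--     return "".join(x[off[v % l] + v // l] for v in range(n))
-- ===== Notes on version B (the rewrite author's own statement) =====
-- stated objective: simpler
-- what changed: A materialises the whole permutation as a list of indices (built from strided slices) and scatter-writes each character into a preallocated None-list; B never builds the permutation: it computes the ragged column offsets by one prefix-sum loop and reads each output character directly at the closed-form position x[off[v % l] + v // l].
import Mathlib
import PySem

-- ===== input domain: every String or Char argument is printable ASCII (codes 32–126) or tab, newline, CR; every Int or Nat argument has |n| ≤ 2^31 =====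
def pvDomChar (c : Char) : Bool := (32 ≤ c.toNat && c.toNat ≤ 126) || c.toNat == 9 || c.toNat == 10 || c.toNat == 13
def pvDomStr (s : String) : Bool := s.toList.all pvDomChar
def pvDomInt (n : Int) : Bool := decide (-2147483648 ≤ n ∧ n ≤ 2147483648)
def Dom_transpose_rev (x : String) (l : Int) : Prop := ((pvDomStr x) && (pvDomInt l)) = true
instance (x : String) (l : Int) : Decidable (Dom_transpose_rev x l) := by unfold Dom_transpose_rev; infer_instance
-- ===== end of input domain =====

-- B replaces A's explicit permutation list and scatter write with a direct closed-form
-- index map (column offsets by prefix sums); objective: simpler.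

-- ===== PORT A =====
-- literal transliteration of A; 'retlst[v] = x[i]' stores the Option from pyGet?.
-- Python's "".join raises TypeError if a None entry is left (only when l < 1 and x != ""),
-- excluded by Pre_; inside Pre_ every entry is set (v is a nonneg index < len(x)) and the
-- '.getD' placeholders are never reached.
def transpose_rev (x : String) (l : Int) : String :=
  let cs := x.toList
  let xx : List Int := PySem.List.pyRange 0 (cs.length : Int) 1
  let lst : List Int := (PySem.List.pyRange 0 l 1).foldl
      (fun acc i => acc ++ ((PySem.List.slice? xx (some i) none l).getD [])) []
  let retlst : List (Option Char) :=
    (PySem.List.enumerate lst 0).foldl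
      (fun r p => r.set p.2.toNat (PySem.List.pyGet? cs p.1)) (List.replicate cs.length none)
  String.ofList (retlst.map (fun o => o.getD ' '))

-- ===== PORT B =====
-- mirror of Source B: guard for empty x; one loop building (off, total) by prefix sums of the
-- ragged column sizes; then a direct map x[off[v % l] + v // l] over v in range(n).
-- Inside Pre_ the index is always in range, so the '.getD' placeholder is never reached.
def transpose_rev_alt (x : String) (l : Int) : String :=
  let cs := x.toList
  let n : Int := (cs.length : Int)
  if cs.length = 0 then "" else
  let st := (PySem.List.pyRange 0 l 1).foldl
      (fun (s : List Int × Int) c => (s.1 ++ [s.2], s.2 + PySem.Int.floordiv (n - c + l - 1) l)) ([], 0)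
  String.ofList ((PySem.List.pyRange 0 n 1).map (fun v =>
      (PySem.List.pyGet? cs (PySem.List.pyGetD st.1 (PySem.Int.mod v l) 0 + PySem.Int.floordiv v l)).getD ' '))


-- ===== PRECONDITION & SPEC =====
-- Pre_ excludes exactly the inputs where Python A raises: for x ≠ "" and l < 1 the
-- permutation list stays empty, retlst keeps its None entries and "".join raises TypeError.
def Pre_transpose_rev (x : String) (l : Int) : Prop := x = "" ∨ 1 ≤ l
instance (x : String) (l : Int) : Decidable (Pre_transpose_rev x l) := by unfold Pre_transpose_rev; infer_instance
def pvWitness_transpose_rev : String × Int := ("abcdefg", 3)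

def Spec_transpose_rev (x : String) (l : Int) (out : String) : Prop := out = transpose_rev_alt x l
instance (x : String) (l : Int) (out : String) : Decidable (Spec_transpose_rev x l out) := by unfold Spec_transpose_rev; infer_instance

-- ===== CLAIM (what is proved, stated in full; the proofs are below) =====
def Claim_equal_transpose_rev : Prop := ∀ (x : String) (l : Int), Dom_transpose_rev x l → Pre_transpose_rev x l → Spec_transpose_rev x l (transpose_rev x l)

-- ===== LEMMAS AND PROOFS =====
def pvSz (n L i : Nat) : Nat := (n - i + L - 1) / L

theorem pv_div_eq (n L c : Nat) (l : Int) (hl : l = (L : Int)) (hL : 1 ≤ L) (hc : c < L) :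
    ((n : Int) - c + l - 1) / l = (pvSz n L c : Int) := by
  subst hl
  unfold pvSz
  rcases Nat.le_total c n with h | h
  · have e : (n : Int) - c + L - 1 = ((n - c + L - 1 : Nat) : Int) := by omega
    rw [e, ← Int.natCast_div]
  · have e0 : n - c = 0 := by omega
    have h1 : (0:Int) ≤ (n : Int) - c + L - 1 := by omega
    have h2 : (n : Int) - c + L - 1 < (L:Int) := by omega
    have e1 : (n - c + L - 1) / L = 0 := by
      rw [e0]; exact Nat.div_eq_of_lt (by omega)
    rw [Int.ediv_eq_zero_of_lt h1 h2, e1]; simp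

theorem pv_fdiv_eq (n L c : Nat) (l : Int) (hl : l = (L : Int)) (hL : 1 ≤ L) (hc : c < L) :
    PySem.Int.floordiv ((n : Int) - c + l - 1) l = (pvSz n L c : Int) := by
  rw [PySem.Int.floordiv, Int.fdiv_eq_ediv, ← pv_div_eq n L c l hl hL hc]
  have : (0:Int) ≤ l := by rw [hl]; positivity
  simp [this]

theorem pv_index_lt (n L i k : Nat) (hL : 1 ≤ L) (hk : k < pvSz n L i) : i + L * k < n := by
  unfold pvSz at hk
  have h1 : (k + 1) * L ≤ n - i + L - 1 := (Nat.le_div_iff_mul_le (by omega)).mp hk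
  have h2 : (k + 1) * L = L * k + L := by ring
  have h3 : L * k + L ≤ n - i + L - 1 := by omega
  omega

theorem pv_div_lt_sz (n L u : Nat) (hL : 1 ≤ L) (hu : u < n) : u / L < pvSz n L (u % L) := by
  unfold pvSz
  have hdm := Nat.div_add_mod u L
  have h2 : (u / L + 1) * L = L * (u / L) + L := by ring
  have h1 : (u / L + 1) * L ≤ n - u % L + L - 1 := by omega
  exact (Nat.le_div_iff_mul_le (by omega : 0 < L)).mpr h1
def pvCol (n L i : Nat) : List Int := (List.range (pvSz n L i)).map (fun k => ((i + L * k : Nat) : Int))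
def pvLst (n L : Nat) : List Int := (List.range L).flatMap (pvCol n L)
def pvOff (n L c : Nat) : Nat := ((List.range c).map (pvSz n L)).sum

theorem pv_filterMap_range {β : Type} (f : Nat → Option β) (g : Nat → β) :
    ∀ (m : Nat), (∀ k < m, f k = some (g k)) →
    (List.range m).filterMap f = (List.range m).map g := by
  intro m
  induction m with
  | zero => intro _; simp
  | succ m ih =>
    intro h
    rw [List.range_succ, List.filterMap_append, List.map_append, ih (fun k hk => h k (by omega))]
    simp [h m (by omega)]

theorem pv_col_eq (n L : Nat) (l : Int) (i : Nat) (hl : l = (L : Int)) (hL : 1 ≤ L) (hi : i < L) :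
    (PySem.List.slice? (PySem.List.pyRange 0 (n : Int) 1) (some (i : Int)) none l).getD []
      = pvCol n L i := by
  have hstep : ¬ (l = 0) := by omega
  have hneg : ¬ (l < 0) := by omega
  have hi0 : ¬ ((i : Int) < 0) := by omega
  rw [PySem.List.slice?]
  simp only [if_neg hstep, PySem.List.sliceIndices, PySem.List.length_pyRange_one, if_neg hneg, hi0]
  simp only [if_pos (show 0 < l by omega), Int.sub_zero, Int.toNat_natCast, if_false, Option.getD_some]
  rcases Nat.le_total n i with h | h
  · have hmin : min (i:Int) (n:Int) = (n:Int) := by omega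
    have hsz : pvSz n L i = 0 := by
      unfold pvSz
      have : n - i = 0 := by omega
      rw [this]; exact Nat.div_eq_of_lt (by omega)
    rw [hmin]
    simp [pvCol, hsz]
  · have hmin : min (i:Int) (n:Int) = (i:Int) := by omega
    by_cases hin : i = n
    · subst hin
      have hsz : pvSz i L i = 0 := by
        unfold pvSz
        have : i - i = 0 := by omega
        rw [this]; exact Nat.div_eq_of_lt (by omega)
      rw [hmin]
      simp [pvCol, hsz]
    · have hlt : (i:Int) < (n:Int) := by omega
      rw [hmin, if_pos hlt, pv_div_eq n L i l hl hL hi, Int.toNat_natCast]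
      unfold pvCol
      apply pv_filterMap_range
      intro k hk
      have hidx : i + L * k < n := pv_index_lt n L i k hL hk
      have e : ((i:Int) + l * (k:Nat)).toNat = i + L * k := by rw [hl]; omega
      rw [e, PySem.List.getElem?_pyRange_one]
      rw [if_pos (by omega : i + L * k < ((n:Int) - 0).toNat)]
      simp

theorem pv_lst_eq (x : String) (l : Int) (hl : 1 ≤ l) :
    (PySem.List.pyRange 0 l 1).foldl
      (fun acc i => acc ++ ((PySem.List.slice? (PySem.List.pyRange 0 (x.toList.length : Int) 1) (some i) none l).getD [])) []
      = pvLst x.toList.length l.toNat := by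
  set n := x.toList.length
  set L := l.toNat with hLdef
  have hl' : l = (L : Int) := by omega
  have hL : 1 ≤ L := by omega
  rw [PySem.List.foldl_append_eq_flatMap, List.nil_append]
  have houter : PySem.List.pyRange 0 l 1 = (List.range L).map (fun k => ((k : Nat) : Int)) := by
    rw [hl', PySem.List.pyRange_zero_nat]
  rw [houter, List.flatMap_map]
  unfold pvLst
  rw [List.flatMap_def, List.flatMap_def]
  refine congrArg List.flatten (List.map_congr_left ?_)
  intro i hi
  rw [List.mem_range] at hi
  exact pv_col_eq n L l i hl' hL hi

theorem pv_mem_lst (n L u : Nat) (hL : 1 ≤ L) (hu : u < n) : (u : Int) ∈ pvLst n L := by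
  unfold pvLst
  rw [List.mem_flatMap]
  refine ⟨u % L, by simp [List.mem_range, Nat.mod_lt u (by omega : 0 < L)], ?_⟩
  unfold pvCol
  rw [List.mem_map]
  refine ⟨u / L, by simp [List.mem_range, pv_div_lt_sz n L u hL hu], ?_⟩
  exact_mod_cast Nat.mod_add_div u L

theorem pv_mem_col_residue (n L i : Nat) (hi : i < L) (v : Int) (hv : v ∈ pvCol n L i) :
    ∃ k, v = ((i + L * k : Nat) : Int) := by
  unfold pvCol at hv
  rw [List.mem_map] at hv
  obtain ⟨k, _, hk⟩ := hv
  exact ⟨k, hk.symm⟩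

theorem pv_nonneg_lst (n L : Nat) (v : Int) (hv : v ∈ pvLst n L) : 0 ≤ v := by
  unfold pvLst at hv
  rw [List.mem_flatMap] at hv
  obtain ⟨i, hi, hvi⟩ := hv
  unfold pvCol at hvi
  rw [List.mem_map] at hvi
  obtain ⟨k, _, hk⟩ := hvi
  omega

theorem pv_nodup_col (n L i : Nat) (hL : 1 ≤ L) : (pvCol n L i).Nodup := by
  unfold pvCol
  refine List.Nodup.map ?_ (List.nodup_range)
  intro a b hab
  have h2 : ((i + L * a : Nat) : Int) = ((i + L * b : Nat) : Int) := hab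
  have h3 : i + L * a = i + L * b := by exact_mod_cast h2
  have := Nat.eq_of_mul_eq_mul_left (by omega : 0 < L) (by omega : L * a = L * b)
  omega

theorem pv_nodup_lst (n L : Nat) (hL : 1 ≤ L) : (pvLst n L).Nodup := by
  unfold pvLst
  rw [List.nodup_flatMap]
  constructor
  · intro i _; exact pv_nodup_col n L i hL
  · have hpl : (List.range L).Pairwise (· < ·) := List.pairwise_lt_range
    refine hpl.imp_of_mem ?_
    intro i j hi hj hij
    rw [List.mem_range] at hi hj
    intro v hvi hvj
    obtain ⟨a, ha⟩ := pv_mem_col_residue n L i hi v hvi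
    obtain ⟨b, hb⟩ := pv_mem_col_residue n L j hj v hvj
    have heq : i + L * a = j + L * b := by rw [ha] at hb; exact_mod_cast hb
    have hmi : (i + L * a) % L = i := by
      rw [Nat.add_mul_mod_self_left]; exact Nat.mod_eq_of_lt hi
    have hmj : (j + L * b) % L = j := by
      rw [Nat.add_mul_mod_self_left]; exact Nat.mod_eq_of_lt hj
    have h4 : (i + L * a) % L = (j + L * b) % L := by rw [heq]
    rw [hmi, hmj] at h4
    omega

theorem pv_idxOf_map_range (f : Nat → Int) (hf : Function.Injective f) :
    ∀ (cnt s k : Nat), k < cnt →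
      List.idxOf (f (s + k)) ((List.range' s cnt).map f) = k := by
  intro cnt
  induction cnt with
  | zero => intro s k h; omega
  | succ m ih =>
    intro s k hk
    rw [List.range'_succ, List.map_cons]
    by_cases h0 : k = 0
    · subst h0; simp
    · have hne : f (s + k) ≠ f s := by
        intro h; have := hf h; omega
      rw [List.idxOf_cons_ne _ (by simpa using hne.symm)]
      have : s + k = (s + 1) + (k - 1) := by omega
      rw [this, ih (s + 1) (k - 1) (by omega)]
      omega

theorem pv_idxOf_col (n L i k : Nat) (hL : 1 ≤ L) (hk : k < pvSz n L i) :
    List.idxOf ((i + L * k : Nat) : Int) (pvCol n L i) = k := by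
  unfold pvCol
  have hf : Function.Injective (fun k => ((i + L * k : Nat) : Int)) := by
    intro a b hab
    have h2 : ((i + L * a : Nat) : Int) = ((i + L * b : Nat) : Int) := hab
    have h3 : i + L * a = i + L * b := by exact_mod_cast h2
    have := Nat.eq_of_mul_eq_mul_left (by omega : 0 < L) (by omega : L * a = L * b)
    omega
  have := pv_idxOf_map_range _ hf (pvSz n L i) 0 k hk
  rw [List.range_eq_range']
  simpa using this

theorem pv_length_flatMap_cols (n L m : Nat) :
    ((List.range m).flatMap (pvCol n L)).length = pvOff n L m := by
  rw [List.length_flatMap]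
  unfold pvOff
  congr 1
  refine List.map_congr_left ?_
  intro i _
  simp [pvCol]

theorem pv_mem_flatMap_cols (n L m u : Nat) (hL : 1 ≤ L) (hm : m ≤ L) (hu : u < n)
    (hcol : u % L < m) : (u : Int) ∈ (List.range m).flatMap (pvCol n L) := by
  rw [List.mem_flatMap]
  refine ⟨u % L, by simp [List.mem_range, hcol], ?_⟩
  unfold pvCol
  rw [List.mem_map]
  refine ⟨u / L, by simp [List.mem_range, pv_div_lt_sz n L u hL hu], ?_⟩
  exact_mod_cast Nat.mod_add_div u L

theorem pv_idxOf_lst (n L u : Nat) (hL : 1 ≤ L) (hu : u < n) :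
    List.idxOf (u : Int) (pvLst n L) = pvOff n L (u % L) + u / L := by
  unfold pvLst
  suffices h : ∀ m, m ≤ L → u % L < m →
      List.idxOf (u : Int) ((List.range m).flatMap (pvCol n L)) = pvOff n L (u % L) + u / L by
    exact h L le_rfl (Nat.mod_lt u (by omega))
  intro m
  induction m with
  | zero => omega
  | succ m ih =>
    intro hm hcol
    have hnotmem : ∀ u' : Nat, ¬ u' % L < m → (u' : Int) ∉ (List.range m).flatMap (pvCol n L) := by
      intro u' hge hmem
      rw [List.mem_flatMap] at hmem
      obtain ⟨j, hj, hjc⟩ := hmem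
      rw [List.mem_range] at hj
      obtain ⟨k, hk⟩ := pv_mem_col_residue n L j (by omega) _ hjc
      have h1 : u' = j + L * k := by exact_mod_cast hk
      have h2 : (j + L * k) % L = j := by
        rw [Nat.add_mul_mod_self_left]; exact Nat.mod_eq_of_lt (by omega)
      have h3 : u' % L = j := by rw [h1, h2]
      omega
    rw [List.range_succ, List.flatMap_append]
    rw [List.idxOf_append]
    by_cases hc : u % L < m
    · rw [if_pos (pv_mem_flatMap_cols n L m u hL (by omega) hu hc)]
      exact ih (by omega) hc
    · rw [if_neg (hnotmem u hc)]
      have hm' : u % L = m := by omega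
      have hdm : u = m + L * (u / L) := by
        conv_lhs => rw [← Nat.mod_add_div u L]
        omega
      have hcast : (u : Int) = ((m + L * (u / L) : Nat) : Int) := by exact_mod_cast hdm
      rw [List.flatMap_singleton, hcast,
        pv_idxOf_col n L m (u / L) hL (hm' ▸ pv_div_lt_sz n L u hL hu),
        pv_length_flatMap_cols n L m, hm']
      omega

theorem pv_scatter (cs : List Char) : ∀ (lst : List Int), lst.Nodup →
    (∀ v ∈ lst, 0 ≤ v) → ∀ (r0 : List (Option Char)) (s : Int) (u : Nat), u < r0.length →
    ((PySem.List.enumerate lst s).foldl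
        (fun r p => r.set p.2.toNat (PySem.List.pyGet? cs p.1)) r0)[u]? =
      (if (u : Int) ∈ lst then some (PySem.List.pyGet? cs (s + (List.idxOf (u : Int) lst : Int)))
      else r0[u]?) := by
  intro lst
  induction lst with
  | nil => intro _ _ r0 s u hu; simp [PySem.List.enumerate]
  | cons v t ih =>
    intro hnd hpos r0 s u hu
    rw [PySem.List.enumerate_cons, List.foldl_cons]
    have hvt : v ∉ t := (List.nodup_cons.mp hnd).1
    have hv0 : 0 ≤ v := hpos v List.mem_cons_self
    have hlen : u < (r0.set v.toNat (PySem.List.pyGet? cs s)).length := by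
      rwa [List.length_set]
    rw [ih (List.nodup_cons.mp hnd).2 (fun w hw => hpos w (List.mem_cons_of_mem _ hw)) _ (s+1) u hlen]
    by_cases hut : (u : Int) ∈ t
    · have hvu : v ≠ (u : Int) := fun h => hvt (h ▸ hut)
      rw [if_pos hut, if_pos (List.mem_cons_of_mem _ hut)]
      rw [List.idxOf_cons_ne _ hvu]
      have harg : s + 1 + (List.idxOf ((u:Nat):Int) t : Int)
          = s + ((List.idxOf ((u:Nat):Int) t + 1 : Nat) : Int) := by push_cast; ring
      rw [harg]
    · rw [if_neg hut]
      by_cases hvu : v = (u : Int)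
      · rw [if_pos (hvu ▸ List.mem_cons_self)]
        have : v.toNat = u := by omega
        rw [this, List.getElem?_set_self (by omega)]
        rw [hvu, List.idxOf_cons_self]
        simp
      · rw [if_neg (by
          intro h
          rcases List.mem_cons.mp h with h1 | h2
          · exact hvu h1.symm
          · exact hut h2)]
        rw [List.getElem?_set_ne (by omega)]

theorem pv_scatter_length (cs : List Char) (ps : List (Int × Int)) :
    ∀ (r0 : List (Option Char)),
    (ps.foldl (fun r p => r.set p.2.toNat (PySem.List.pyGet? cs p.1)) r0).length = r0.length := by
  induction ps with
  | nil => intro r0; rfl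
  | cons p t ih => intro r0; rw [List.foldl_cons, ih, List.length_set]

theorem pv_off_succ (n L m : Nat) : pvOff n L (m + 1) = pvOff n L m + pvSz n L m := by
  unfold pvOff
  rw [List.range_succ, List.map_append, List.sum_append]
  simp

theorem pv_offlist (n L : Nat) (l : Int) (hl : l = (L : Int)) (hL : 1 ≤ L) :
    (PySem.List.pyRange 0 l 1).foldl
      (fun (s : List Int × Int) c => (s.1 ++ [s.2], s.2 + PySem.Int.floordiv ((n : Int) - c + l - 1) l)) ([], 0)
      = ((List.range L).map (fun c => (pvOff n L c : Nat) : Nat → Int), (pvOff n L L : Int)) := by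
  have houter : PySem.List.pyRange 0 l 1 = (List.range L).map (fun k => ((k : Nat) : Int)) := by
    rw [hl, PySem.List.pyRange_zero_nat]
  rw [houter, List.foldl_map]
  suffices h : ∀ m, m ≤ L → (List.range m).foldl
      (fun (s : List Int × Int) (c : Nat) => (s.1 ++ [s.2], s.2 + PySem.Int.floordiv ((n : Int) - (c : Int) + l - 1) l)) ([], 0)
      = ((List.range m).map (fun c => ((pvOff n L c : Nat) : Int)), ((pvOff n L m : Nat) : Int)) by
    exact h L le_rfl
  intro m
  induction m with
  | zero => intro _; simp [pvOff]
  | succ m ih =>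
    intro hm
    rw [List.range_succ, List.foldl_append, ih (by omega), List.foldl_cons, List.foldl_nil,
      pv_fdiv_eq n L m l hl hL (by omega)]
    rw [List.map_append, Prod.mk.injEq]
    refine ⟨rfl, ?_⟩
    rw [pv_off_succ]
    push_cast
    ring

theorem pv_A_empty (x : String) (l : Int) (hx : x = "") : transpose_rev x l = "" := by
  subst hx
  simp only [transpose_rev]
  have hcs : ("" : String).toList = [] := rfl
  rw [hcs]
  have hxx : PySem.List.pyRange 0 (([] : List Char).length : Int) 1 = [] := by
    simp
  rw [hxx]
  have hlst : (PySem.List.pyRange 0 l 1).foldl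
      (fun acc i => acc ++ ((PySem.List.slice? ([] : List Int) (some i) none l).getD [])) [] = [] := by
    refine Eq.trans (PySem.List.foldl_congr_mem _ _ (fun acc (_ : Int) => acc) _ ?_) (PySem.List.foldl_ignore _ _)
    intro acc i hi
    rw [PySem.List.mem_pyRange_one] at hi
    have h1 : ¬ (l = 0) := by omega
    have h2 : ¬ (l < 0) := by omega
    have h3 : ¬ ((i : Int) < 0) := by omega
    rw [PySem.List.slice?]
    simp only [if_neg h1, PySem.List.sliceIndices]
    simp [h2, h3, show min i 0 = 0 by omega]
  rw [hlst]
  rfl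

theorem pv_main (x : String) (l : Int) (hl : 1 ≤ l) : transpose_rev x l = transpose_rev_alt x l := by
  by_cases hn0 : x.toList.length = 0
  · have hx : x = "" := String.toList_eq_nil_iff.mp (List.length_eq_zero_iff.mp hn0)
    rw [pv_A_empty x l hx, hx]
    rfl
  · set cs := x.toList with hcs
    set n := cs.length with hn
    set L := l.toNat with hLdef
    have hl' : l = (L : Int) := by omega
    have hL : 1 ≤ L := by omega
    simp only [transpose_rev, transpose_rev_alt, ← hcs, ← hn, if_neg hn0]
    rw [pv_lst_eq x l hl, pv_offlist n L l hl' hL]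
    have hlenr : ((PySem.List.enumerate (pvLst n L) 0).foldl
        (fun r p => r.set p.2.toNat (PySem.List.pyGet? cs p.1)) (List.replicate n none)).length = n := by
      rw [pv_scatter_length, List.length_replicate]
    refine congrArg String.ofList (List.ext_getElem? ?_)
    intro u
    rw [List.getElem?_map, List.getElem?_map]
    by_cases hu : u < n
    · rw [pv_scatter cs (pvLst n L) (pv_nodup_lst n L hL) (pv_nonneg_lst n L) _ 0 u
        (by rw [List.length_replicate]; exact hu)]
      rw [if_pos (pv_mem_lst n L u hL hu), pv_idxOf_lst n L u hL hu]
      rw [PySem.List.getElem?_pyRange_one, if_pos (by omega : u < ((n : Int) - 0).toNat)]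
      simp only [Option.map_some]
      congr 1
      have hmod : PySem.Int.mod (0 + (u : Int)) l = ((u % L : Nat) : Int) := by
        rw [PySem.Int.mod, Int.fmod_eq_emod, if_pos (Or.inl (by omega)), add_zero, zero_add, hl']
        push_cast
        omega
      have hdiv : PySem.Int.floordiv (0 + (u : Int)) l = ((u / L : Nat) : Int) := by
        rw [PySem.Int.floordiv, Int.fdiv_eq_ediv, if_pos (Or.inl (by omega)), sub_zero, zero_add,
          hl', ← Int.natCast_div]
      rw [hmod, hdiv, PySem.List.pyGetD_natCast,
        PySem.List.getD_map_range _ _ _ _ (Nat.mod_lt u (by omega : 0 < L))]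
      have harg : (0 : Int) + ((pvOff n L (u % L) + u / L : Nat) : Int)
          = ((pvOff n L (u % L) : Nat) : Int) + ((u / L : Nat) : Int) := by push_cast; ring
      rw [harg]
    · have h1 : ((PySem.List.enumerate (pvLst n L) 0).foldl
          (fun r p => r.set p.2.toNat (PySem.List.pyGet? cs p.1)) (List.replicate n none))[u]? = none := by
        rw [List.getElem?_eq_none_iff, hlenr]
        omega
      have h2 : (PySem.List.pyRange 0 (n : Int) 1)[u]? = none := by
        rw [PySem.List.getElem?_pyRange_one, if_neg (by omega)]
      rw [h1, h2]
      rfl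

-- ===== VERDICT (by name: the statement is the Claim_ definition above) =====
theorem transpose_rev_spec : Claim_equal_transpose_rev := by
  intro x l _ hpre
  unfold Spec_transpose_rev
  rcases hpre with hx | hl
  · rw [pv_A_empty x l hx, hx]; rfl
  · exact pv_main x l hl
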